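-- pv_equiv track=rewrite | github.com/cowgoesmoo69/aurorawatch-uk-alerts | app/aurorawatchuk.py | process_status_ids
-- ===== SOURCE A (Python) =====
-- def process_status_ids(
--     status_ids,
--     ):
--     # Determine the lowest-ranked status ID across all sites and return it as an integer between 0 and 3.
--     RANK_ORDER = ["green", "yellow", "amber", "red"]
--     statuses = {s["status_id"] for s in status_ids}
--     for i, rank in enumerate(RANK_ORDER):
--         if rank in statuses:
--             return i
--     # If something goes wrong, raise.
--     raise RuntimeError(
--         "Data returned from AuroraWatch UK API contained invalid status values."
--         )
-- ===== SOURCE B (Python) =====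
-- RANK_INDEX = {"green": 0, "yellow": 1, "amber": 2, "red": 3}
--
--
-- def process_status_ids(
--     status_ids,
--     ):
--     # Single pass: collect the rank index of every known status, then take the minimum.
--     indices = [RANK_INDEX[s["status_id"]] for s in status_ids if s["status_id"] in RANK_INDEX]
--     if not indices:
--         raise RuntimeError(
--             "Data returned from AuroraWatch UK API contained invalid status values."
--             )
--     return min(indices)
-- ===== Notes on version B (the rewrite author's own statement) =====
-- stated objective: alternative
-- what changed: B replaces A's build-a-set-then-probe-ranks-in-priority-order-with-early-return by a single pass that collects the rank index of each known status and returns the minimum.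
import Mathlib
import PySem

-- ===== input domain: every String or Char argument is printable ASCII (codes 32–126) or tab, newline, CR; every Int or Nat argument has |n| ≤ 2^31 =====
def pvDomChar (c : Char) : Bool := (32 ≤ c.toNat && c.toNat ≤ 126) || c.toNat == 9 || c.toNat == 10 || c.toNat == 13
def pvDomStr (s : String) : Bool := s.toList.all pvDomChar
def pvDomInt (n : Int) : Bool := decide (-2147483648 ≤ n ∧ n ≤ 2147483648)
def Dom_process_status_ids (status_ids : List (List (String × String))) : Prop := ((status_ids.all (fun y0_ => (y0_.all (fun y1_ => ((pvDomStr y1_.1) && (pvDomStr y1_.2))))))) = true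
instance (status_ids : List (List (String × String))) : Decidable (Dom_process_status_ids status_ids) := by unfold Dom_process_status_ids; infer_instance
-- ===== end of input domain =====

-- B replaces A's build-a-set-then-probe-ranks-in-priority-order-with-early-return by a
-- single pass that collects the rank index of each known status and returns the minimum.
-- Equivalence of RETURN values is proved on Pre_ (inputs where A returns normally).

-- ===== PORT A =====
def pvRankOrder : List String := ["green", "yellow", "amber", "red"]

-- the 'for i, rank in enumerate(RANK_ORDER): if rank in statuses: return i' loop;
-- the fall-through [] case is Python's 'raise RuntimeError' (excluded by Pre_), -1 stands in for it.
def pvALoop (statuses : PySem.Set String) : List (Int × String) → Int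
  | [] => -1
  | (i, rank) :: rest => if PySem.Set.contains statuses rank then i else pvALoop statuses rest

-- s["status_id"]: first match in the association list (the dict convention);
-- a missing key is Python's KeyError (excluded by Pre_), "" stands in for it.
def pvStatusId (s : List (String × String)) : String :=
  ((List.find? (fun p => p.1 == "status_id") s).map (fun p => p.2)).getD ""

def process_status_ids (status_ids : List (List (String × String))) : Int :=
  let statuses : PySem.Set String :=
    PySem.Set.ofList (status_ids.map (fun s => pvStatusId s))
  pvALoop statuses (PySem.List.enumerate pvRankOrder)

-- ===== PORT B =====
def pvRankIndex : PySem.Dict String Int :=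
  PySem.Dict.ofList [("green", 0), ("yellow", 1), ("amber", 2), ("red", 3)]

def process_status_ids_alt (status_ids : List (List (String × String))) : Int :=
  -- the comprehension '[RANK_INDEX[s["status_id"]] for s in status_ids if s["status_id"] in RANK_INDEX]';
  -- s["status_id"] raises KeyError when the key is absent (excluded by Pre_); getD "" stands in for it.
  let indices : List Int :=
    status_ids.filterMap (fun s => PySem.Dict.get? pvRankIndex (pvStatusId s))
  -- 'if not indices: raise RuntimeError' (excluded by Pre_, -1 stands in for it); 'return min(indices)'
  match PySem.List.min? indices (fun x => x) with
  | some m => m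
  | none => -1

-- ===== PRECONDITION & SPEC =====
-- Pre_ excludes exactly the inputs where A raises: a site dict without a "status_id" key
-- (KeyError) and inputs whose statuses contain none of the four ranks (RuntimeError).
def Pre_process_status_ids (status_ids : List (List (String × String))) : Prop :=
  (∀ s ∈ status_ids, (List.find? (fun p => p.1 == "status_id") s).isSome = true) ∧
  (∃ s ∈ status_ids, pvStatusId s ∈ (["green", "yellow", "amber", "red"] : List String))

instance (status_ids : List (List (String × String))) : Decidable (Pre_process_status_ids status_ids) := by
  unfold Pre_process_status_ids; infer_instance

def pvWitness_process_status_ids : (List (List (String × String))) :=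
  [[("status_id", "yellow")], [("status_id", "green"), ("note", "x")]]

def Spec_process_status_ids (status_ids : List (List (String × String))) (out : Int) : Prop := out = process_status_ids_alt status_ids
instance (status_ids : List (List (String × String))) (out : Int) : Decidable (Spec_process_status_ids status_ids out) := by unfold Spec_process_status_ids; infer_instance

-- ===== CLAIM (what is proved, stated in full; the proofs are below) =====
def Claim_equal_process_status_ids : Prop := ∀ (status_ids : List (List (String × String))), Dom_process_status_ids status_ids → Pre_process_status_ids status_ids → Spec_process_status_ids status_ids (process_status_ids status_ids)

-- ===== LEMMAS AND PROOFS =====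

-- the values looked up from the site dicts
def pvVals (status_ids : List (List (String × String))) : List String :=
  status_ids.map (fun s => pvStatusId s)

lemma pvLookup_eq (v : String) :
    PySem.Dict.get? pvRankIndex v =
      if v = "green" then some 0 else if v = "yellow" then some 1
      else if v = "amber" then some 2 else if v = "red" then some 3 else none := by
  have hitems : pvRankIndex.items = [("green", (0 : Int)), ("yellow", 1), ("amber", 2), ("red", 3)] := by
    decide
  simp only [PySem.Dict.get?, hitems]
  by_cases h0 : v = "green"
  · subst h0; decide
  by_cases h1 : v = "yellow"
  · subst h1; decide
  by_cases h2 : v = "amber"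
  · subst h2; decide
  by_cases h3 : v = "red"
  · subst h3; decide
  have g0 : ("green" == v) = false := beq_eq_false_iff_ne.mpr (fun h => h0 h.symm)
  have g1 : ("yellow" == v) = false := beq_eq_false_iff_ne.mpr (fun h => h1 h.symm)
  have g2 : ("amber" == v) = false := beq_eq_false_iff_ne.mpr (fun h => h2 h.symm)
  have g3 : ("red" == v) = false := beq_eq_false_iff_ne.mpr (fun h => h3 h.symm)
  simp [List.find?, g0, g1, g2, g3, h0, h1, h2, h3]

lemma pvMem_indices (vals : List String) (i : Int) :
    i ∈ vals.filterMap (fun v => PySem.Dict.get? pvRankIndex v) ↔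
      (i = 0 ∧ "green" ∈ vals) ∨ (i = 1 ∧ "yellow" ∈ vals) ∨
      (i = 2 ∧ "amber" ∈ vals) ∨ (i = 3 ∧ "red" ∈ vals) := by
  simp only [List.mem_filterMap]
  constructor
  · rintro ⟨v, hv, hf⟩
    rw [pvLookup_eq] at hf
    split_ifs at hf with h0 h1 h2 h3 <;> simp_all
  · rintro (⟨rfl, h⟩ | ⟨rfl, h⟩ | ⟨rfl, h⟩ | ⟨rfl, h⟩)
    · exact ⟨"green", h, by rw [pvLookup_eq]; simp⟩
    · exact ⟨"yellow", h, by rw [pvLookup_eq]; simp⟩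
    · exact ⟨"amber", h, by rw [pvLookup_eq]; simp⟩
    · exact ⟨"red", h, by rw [pvLookup_eq]; simp⟩

-- A's loop over the literal rank list, as a nested if on memberships in vals
lemma pvA_eq (vals : List String) :
    pvALoop (PySem.Set.ofList vals) (PySem.List.enumerate pvRankOrder) =
      if "green" ∈ vals then 0 else if "yellow" ∈ vals then 1
      else if "amber" ∈ vals then 2 else if "red" ∈ vals then 3 else -1 := by
  have hc : ∀ r : String, PySem.Set.contains (PySem.Set.ofList vals) r = decide (r ∈ vals) := by
    intro r
    simp [PySem.Set.contains, PySem.Set.mem_ofList]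
  show pvALoop (PySem.Set.ofList vals)
      [(0, "green"), (1, "yellow"), (2, "amber"), (3, "red")] = _
  simp only [pvALoop, hc]
  by_cases h0 : "green" ∈ vals <;> by_cases h1 : "yellow" ∈ vals <;>
    by_cases h2 : "amber" ∈ vals <;> by_cases h3 : "red" ∈ vals <;> simp_all

lemma pvB_eq (status_ids : List (List (String × String))) :
    process_status_ids_alt status_ids =
      match PySem.List.min?
          ((pvVals status_ids).filterMap (fun v => PySem.Dict.get? pvRankIndex v)) (fun x => x) with
      | some m => m
      | none => -1 := by
  simp [process_status_ids_alt, pvVals, List.filterMap_map]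

-- ===== VERDICT (by name: the statement is the Claim_ definition above) =====
theorem process_status_ids_spec : Claim_equal_process_status_ids := by
  intro status_ids _ hpre
  unfold Spec_process_status_ids
  obtain ⟨-, s, hs, hmem⟩ := hpre
  have hex : ∃ v ∈ pvVals status_ids, v ∈ (["green", "yellow", "amber", "red"] : List String) :=
    ⟨pvStatusId s, List.mem_map_of_mem hs, hmem⟩
  rw [pvB_eq]
  show pvALoop (PySem.Set.ofList (pvVals status_ids)) (PySem.List.enumerate pvRankOrder) = _
  set vals := pvVals status_ids with hv
  rw [pvA_eq]
  set L := vals.filterMap (fun v => PySem.Dict.get? pvRankIndex v) with hL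
  have hLmem := pvMem_indices vals
  -- L is nonempty: some rank occurs in vals
  have hne : L ≠ [] := by
    obtain ⟨v, hvmem, hvr⟩ := hex
    fin_cases hvr
    · exact List.ne_nil_of_mem ((hLmem 0).mpr (Or.inl ⟨rfl, hvmem⟩))
    · exact List.ne_nil_of_mem ((hLmem 1).mpr (Or.inr (Or.inl ⟨rfl, hvmem⟩)))
    · exact List.ne_nil_of_mem ((hLmem 2).mpr (Or.inr (Or.inr (Or.inl ⟨rfl, hvmem⟩))))
    · exact List.ne_nil_of_mem ((hLmem 3).mpr (Or.inr (Or.inr (Or.inr ⟨rfl, hvmem⟩))))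
  obtain ⟨m, hm⟩ : ∃ m, PySem.List.min? L (fun x => x) = some m := by
    cases h : PySem.List.min? L (fun x => x) with
    | none => exact absurd ((PySem.List.min?_eq_none_iff L _).mp h) hne
    | some m => exact ⟨m, rfl⟩
  rw [hm]
  have hmmem := (hLmem m).mp (PySem.List.min?_mem hm)
  have hmle := PySem.List.min?_id_le hm
  by_cases h0 : "green" ∈ vals
  · have := hmle 0 ((hLmem 0).mpr (Or.inl ⟨rfl, h0⟩))
    simp only [h0, if_pos]
    omega
  · by_cases h1 : "yellow" ∈ vals
    · have := hmle 1 ((hLmem 1).mpr (Or.inr (Or.inl ⟨rfl, h1⟩)))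
      simp only [h0, h1, if_neg, if_pos, not_false_iff]
      rcases hmmem with ⟨rfl, hg⟩ | ⟨rfl, _⟩ | h | h
      · exact absurd hg h0
      · rfl
      · omega
      · omega
    · by_cases h2 : "amber" ∈ vals
      · have := hmle 2 ((hLmem 2).mpr (Or.inr (Or.inr (Or.inl ⟨rfl, h2⟩))))
        simp only [h0, h1, h2, if_neg, if_pos, not_false_iff]
        rcases hmmem with ⟨rfl, hg⟩ | ⟨rfl, hy⟩ | ⟨rfl, _⟩ | h
        · exact absurd hg h0
        · exact absurd hy h1
        · rfl
        · omega
      · by_cases h3 : "red" ∈ vals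
        · simp only [h0, h1, h2, h3, if_neg, if_pos, not_false_iff]
          rcases hmmem with ⟨rfl, hg⟩ | ⟨rfl, hy⟩ | ⟨rfl, ha⟩ | ⟨rfl, _⟩
          · exact absurd hg h0
          · exact absurd hy h1
          · exact absurd ha h2
          · rfl
        · rcases hmmem with ⟨rfl, hg⟩ | ⟨rfl, hy⟩ | ⟨rfl, ha⟩ | ⟨rfl, hr⟩
          · exact absurd hg h0
          · exact absurd hy h1
          · exact absurd ha h2
          · exact absurd hr h3
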